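-- pv_equiv track=rewrite | github.com/AdeptSoftware/CatherineBot.v.1.3d | core/utils/is_.py | is_nickname
-- ===== SOURCE A (Python) =====
-- def is_nickname(text):
--     if text is None:
--         return -1
--     length = len(text)
--     if length < 3 or length > 16:
--         return -1
--     for c in text:
--         if not (('A' <= c <= 'Z') or ('a' <= c <= 'z') or ('0' <= c <= '9') or c == '_'):
--             return 0
--     return 1
-- ===== SOURCE B (Python) =====
-- import re
--
-- _NICK_RE = re.compile(r'[A-Za-z0-9_]*\Z')
--
-- def is_nickname(text):
--     if text is None:
--         return -1
--     if not (3 <= len(text) <= 16):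
--         return -1
--     return 1 if _NICK_RE.match(text) else 0
-- ===== Notes on version B (the rewrite author's own statement) =====
-- stated objective: idiomatic
-- what changed: Replaced the per-character loop with early return by a single precompiled ASCII-character-class regex test ([A-Za-z0-9_]*), keeping the None and length guards.
import Mathlib
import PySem

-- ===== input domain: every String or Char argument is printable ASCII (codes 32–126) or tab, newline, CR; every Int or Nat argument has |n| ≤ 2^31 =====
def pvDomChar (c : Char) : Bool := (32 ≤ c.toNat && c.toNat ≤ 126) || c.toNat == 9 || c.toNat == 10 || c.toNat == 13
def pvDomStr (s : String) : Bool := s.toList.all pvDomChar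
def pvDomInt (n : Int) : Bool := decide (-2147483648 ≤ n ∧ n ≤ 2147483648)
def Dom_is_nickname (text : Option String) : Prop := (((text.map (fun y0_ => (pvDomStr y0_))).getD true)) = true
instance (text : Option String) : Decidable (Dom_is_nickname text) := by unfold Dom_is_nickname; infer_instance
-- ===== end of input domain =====

-- Honest line: B replaces A's per-character loop by one regex character-class test; objective: idiomatic.

-- ===== PORT A =====
-- A's for-loop with early `return 0`: structural recursion over the characters.
def isNickLoopA : List Char → Int
  | [] => 1
  | c :: rest =>
    if ¬ (('A' ≤ c ∧ c ≤ 'Z') ∨ ('a' ≤ c ∧ c ≤ 'z') ∨ ('0' ≤ c ∧ c ≤ '9') ∨ c = '_') then 0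
    else isNickLoopA rest

def is_nickname (text : Option String) : Int :=
  match text with
  | none => -1
  | some s =>
    let length : Int := PySem.Str.len s
    if length < 3 ∨ length > 16 then -1
    else isNickLoopA s.toList

-- ===== PORT B =====
-- re.fullmatch of the character class [A-Za-z0-9_]* ported as its library meaning:
-- every character of the string lies in the class.
def nickClassB (c : Char) : Bool :=
  ('A' ≤ c && c ≤ 'Z') || ('a' ≤ c && c ≤ 'z') || ('0' ≤ c && c ≤ '9') || c == '_'

def is_nickname_alt (text : Option String) : Int :=
  match text with
  | none => -1
  | some s =>
    if ¬ (3 ≤ PySem.Str.len s ∧ PySem.Str.len s ≤ 16) then -1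
    else if s.toList.all nickClassB then 1 else 0

-- ===== PRECONDITION & SPEC =====
def Spec_is_nickname (text : Option String) (out : Int) : Prop := out = is_nickname_alt text
instance (text : Option String) (out : Int) : Decidable (Spec_is_nickname text out) := by unfold Spec_is_nickname; infer_instance

-- ===== CLAIM (what is proved, stated in full; the proofs are below) =====
def Claim_equal_is_nickname : Prop := ∀ (text : Option String), Dom_is_nickname text → Spec_is_nickname text (is_nickname text)

-- ===== LEMMAS AND PROOFS =====

-- ===== VERDICT (by name: the statement is the Claim_ definition above) =====
lemma nickClass_iff (c : Char) :
    (('A' ≤ c ∧ c ≤ 'Z') ∨ ('a' ≤ c ∧ c ≤ 'z') ∨ ('0' ≤ c ∧ c ≤ '9') ∨ c = '_')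
      ↔ nickClassB c = true := by
  simp only [nickClassB, Bool.or_eq_true, Bool.and_eq_true, decide_eq_true_eq, beq_iff_eq]
  tauto

lemma loopA_eq_all (l : List Char) :
    isNickLoopA l = (if l.all nickClassB then 1 else 0) := by
  induction l with
  | nil => simp [isNickLoopA]
  | cons c rest ih =>
    rw [isNickLoopA, ih]
    by_cases h : nickClassB c = true
    · rw [if_neg (by rw [nickClass_iff]; exact not_not_intro h)]
      simp [h]
    · rw [if_pos (by rw [nickClass_iff]; exact h)]
      simp [h]

theorem is_nickname_spec : Claim_equal_is_nickname := by
  intro text _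
  unfold Spec_is_nickname is_nickname is_nickname_alt
  match text with
  | none => rfl
  | some s =>
    simp only [loopA_eq_all]
    by_cases h : 3 ≤ PySem.Str.len s ∧ PySem.Str.len s ≤ 16
    · rw [if_neg (by omega : ¬(PySem.Str.len s < 3 ∨ PySem.Str.len s > 16)),
        if_neg (not_not_intro h)]
    · rw [if_pos (by omega : PySem.Str.len s < 3 ∨ PySem.Str.len s > 16), if_pos h]
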